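-- pv_equiv track=rewrite | github.com/xxonbang/stock_toolkit | modules/news/extractor.py | _is_index_or_market
-- ===== SOURCE A (Python) =====
-- _INDEX_TOKENS = {
--     "코스피", "코스닥", "kospi", "kospi200", "kospi 200", "코스피200",
--     "kosdaq", "krx", "k200", "k-otc", "한국 증시", "한국증시",
--     "s&p 500", "s&p500", "s&p", "snp500",
--     "nasdaq", "nasdaq composite", "nasdaq-100", "nasdaq 100",
--     "dow", "dow jones", "djia", "dow industrial",
--     "russell", "russell 2000", "russell 1000",
--     "vix", "wall street", "월스트리트", "미국 증시", "미국증시",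
--     "spy", "qqq", "arkk", "vti", "voo", "iwm", "tqqq", "sqqq", "soxl", "soxs",
-- }
--
-- def _is_index_or_market(name: str) -> bool:
--     if not name:
--         return False
--     n = name.strip().lower()
--     for token in _INDEX_TOKENS:
--         if n == token or token in n.split():
--             return True
--         if " " in token and token in n:
--             return True
--     return False
-- ===== SOURCE B (Python) =====
-- _INDEX_TOKENS = {
--     "코스피", "코스닥", "kospi", "kospi200", "kospi 200", "코스피200",
--     "kosdaq", "krx", "k200", "k-otc", "한국 증시", "한국증시",
--     "s&p 500", "s&p500", "s&p", "snp500",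
--     "nasdaq", "nasdaq composite", "nasdaq-100", "nasdaq 100",
--     "dow", "dow jones", "djia", "dow industrial",
--     "russell", "russell 2000", "russell 1000",
--     "vix", "wall street", "월스트리트", "미국 증시", "미국증시",
--     "spy", "qqq", "arkk", "vti", "voo", "iwm", "tqqq", "sqqq", "soxl", "soxs",
-- }
--
-- # Partitioned once at module load: whole-word tokens vs multi-word substring tokens.
-- _SINGLE_TOKENS = frozenset(t for t in _INDEX_TOKENS if " " not in t)
-- _MULTI_TOKENS = tuple(t for t in _INDEX_TOKENS if " " in t)
--
-- def _is_index_or_market(name: str) -> bool: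
--     if not name:
--         return False
--     n = name.strip().lower()
--     return any(w in _SINGLE_TOKENS for w in n.split()) or any(t in n for t in _MULTI_TOKENS)
-- ===== Notes on version B (the rewrite author's own statement) =====
-- stated objective: faster
-- what changed: The token set is partitioned once at module load into whole-word tokens and multi-word tokens, so the function becomes two flat any-scans (word membership in a prebuilt frozenset, then substring checks for the few multi-word tokens) instead of a loop that re-splits the name and re-tests every token three ways.
import Mathlib
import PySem

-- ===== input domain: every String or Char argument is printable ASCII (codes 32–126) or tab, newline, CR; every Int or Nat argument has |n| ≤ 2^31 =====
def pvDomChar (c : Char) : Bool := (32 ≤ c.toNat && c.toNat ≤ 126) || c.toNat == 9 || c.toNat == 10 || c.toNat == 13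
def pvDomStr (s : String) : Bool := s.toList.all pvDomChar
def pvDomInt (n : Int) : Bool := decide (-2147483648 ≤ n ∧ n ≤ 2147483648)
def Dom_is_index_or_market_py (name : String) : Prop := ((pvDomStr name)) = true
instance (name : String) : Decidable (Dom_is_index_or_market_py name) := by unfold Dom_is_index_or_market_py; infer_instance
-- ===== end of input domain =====

-- B partitions the token set once into whole-word tokens and multi-word tokens, so the function is two flat scans instead of a per-token loop that re-splits the name (objective: simpler).

-- ===== PORT A =====
-- the module constant _INDEX_TOKENS (a Python set: its distinct elements as a list)
def pvIndexTokens : List String := [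
  "코스피", "코스닥", "kospi", "kospi200", "kospi 200", "코스피200",
  "kosdaq", "krx", "k200", "k-otc", "한국 증시", "한국증시",
  "s&p 500", "s&p500", "s&p", "snp500",
  "nasdaq", "nasdaq composite", "nasdaq-100", "nasdaq 100",
  "dow", "dow jones", "djia", "dow industrial",
  "russell", "russell 2000", "russell 1000",
  "vix", "wall street", "월스트리트", "미국 증시", "미국증시",
  "spy", "qqq", "arkk", "vti", "voo", "iwm", "tqqq", "sqqq", "soxl", "soxs"]

def is_index_or_market_py (name : String) : Bool :=
  if name == "" then false
  else
    let n := PySem.Str.lower (PySem.Str.strip name)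
    pvIndexTokens.any (fun token =>
      (n == token || (PySem.Str.split₀ n).contains token)
      || (PySem.Str.isIn " " token && PySem.Str.isIn token n))

-- ===== PORT B =====
def pvSingleTokens : List String := pvIndexTokens.filter (fun t => !(PySem.Str.isIn " " t))
def pvMultiTokens : List String := pvIndexTokens.filter (fun t => PySem.Str.isIn " " t)

def is_index_or_market_py_alt (name : String) : Bool :=
  if name == "" then false
  else
    let n := PySem.Str.lower (PySem.Str.strip name)
    (PySem.Str.split₀ n).any (fun w => pvSingleTokens.contains w)
    || pvMultiTokens.any (fun t => PySem.Str.isIn t n)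

-- ===== PRECONDITION & SPEC =====
def Spec_is_index_or_market_py (name : String) (out : Bool) : Prop := out = is_index_or_market_py_alt name
instance (name : String) (out : Bool) : Decidable (Spec_is_index_or_market_py name out) := by unfold Spec_is_index_or_market_py; infer_instance

-- ===== CLAIM (what is proved, stated in full; the proofs are below) =====
def Claim_equal_is_index_or_market_py : Prop := ∀ (name : String), Dom_is_index_or_market_py name → Spec_is_index_or_market_py name (is_index_or_market_py name)

-- ===== LEMMAS AND PROOFS =====

-- every word produced by str.split() (the go-loop of PySem.Chars.split₀) consists of non-whitespace characters
theorem split0_go_nonspace (s : List Char) : ∀ (cur : List Char) (accL : List (List Char)),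
    (∀ c ∈ cur, PySem.Chars.isspace c = false) →
    (∀ w ∈ accL, ∀ c ∈ w, PySem.Chars.isspace c = false) →
    ∀ w ∈ PySem.Chars.split₀.go s cur accL, ∀ c ∈ w, PySem.Chars.isspace c = false := by
  induction s with
  | nil =>
      intro cur accL hcur hacc w hw
      unfold PySem.Chars.split₀.go at hw
      split at hw
      · exact hacc w (by simpa using hw)
      · simp at hw
        rcases hw with h | h
        · exact hacc w h
        · subst h; intro c hc; exact hcur c (by simpa using hc)
  | cons c rest ih =>
      intro cur accL hcur hacc w hw
      unfold PySem.Chars.split₀.go at hw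
      by_cases hsp : PySem.Chars.isspace c = true
      · rw [if_pos hsp] at hw
        split at hw
        · exact ih [] accL (by simp) hacc w hw
        · refine ih [] (cur.reverse :: accL) (by simp) ?_ w hw
          intro v hv
          simp at hv
          rcases hv with h | h
          · subst h; intro d hd; exact hcur d (by simpa using hd)
          · exact hacc v h
      · rw [if_neg hsp] at hw
        refine ih (c :: cur) accL ?_ hacc w hw
        intro d hd
        simp at hd
        rcases hd with h | h
        · subst h; simpa using hsp
        · exact hcur d h

theorem split0_word_nonspace (n w : List Char) (hw : w ∈ PySem.Chars.split₀ n) :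
    ∀ c ∈ w, PySem.Chars.isspace c = false := by
  have := split0_go_nonspace n [] [] (by simp) (by simp) w
  unfold PySem.Chars.split₀ at hw
  exact this hw

-- every token without a space is a word of its own split (checked on the literal list)
theorem pvTok_fact : pvIndexTokens.all
    (fun t => PySem.Str.isIn " " t || (PySem.Str.split₀ t).contains t) = true := by decide

theorem isIn_refl (t : String) : PySem.Str.isIn t t = true :=
  (PySem.Str.isIn_iff_infix t t).mpr (List.infix_refl _)

theorem space_mem_of_isIn (t : String) (h : PySem.Str.isIn " " t = true) : ' ' ∈ t.toList :=
  ((PySem.Str.isIn_iff_infix " " t).mp h).subset (by decide)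

theorem word_no_space (n w : String) (hw : w ∈ PySem.Str.split₀ n) : ' ' ∉ w.toList := by
  have hm : w.toList ∈ PySem.Chars.split₀ n.toList := by
    rw [← PySem.Str.split₀_map_toList]; exact List.mem_map_of_mem hw
  intro hc
  have := split0_word_nonspace n.toList w.toList hm ' ' hc
  simp [PySem.Chars.isspace] at this

theorem pv_core (n : String) :
    pvIndexTokens.any (fun token =>
      (n == token || (PySem.Str.split₀ n).contains token)
      || (PySem.Str.isIn " " token && PySem.Str.isIn token n))
    = ((PySem.Str.split₀ n).any (fun w => pvSingleTokens.contains w)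
       || pvMultiTokens.any (fun t => PySem.Str.isIn t n)) := by
  rw [Bool.eq_iff_iff]
  simp only [List.any_eq_true, Bool.or_eq_true, Bool.and_eq_true, beq_iff_eq,
    List.contains_iff_mem, pvSingleTokens, pvMultiTokens, List.mem_filter,
    Bool.not_eq_eq_eq_not, Bool.not_true]
  constructor
  · rintro ⟨t, ht, (h | h) | ⟨hsp, hin⟩⟩
    · subst h
      by_cases hs : PySem.Str.isIn " " n = true
      · exact Or.inr ⟨n, ⟨ht, hs⟩, isIn_refl n⟩
      · have hall := List.all_eq_true.mp pvTok_fact n ht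
        simp only [Bool.or_eq_true, List.contains_iff_mem] at hall
        rcases hall with hs' | hmem
        · exact absurd hs' hs
        · exact Or.inl ⟨n, hmem, ht, by simpa using hs⟩
    · by_cases hs : PySem.Str.isIn " " t = true
      · exact absurd (space_mem_of_isIn t hs) (word_no_space n t h)
      · exact Or.inl ⟨t, h, ht, by simpa using hs⟩
    · exact Or.inr ⟨t, ⟨ht, hsp⟩, hin⟩
  · rintro (⟨w, hw, hwt, _⟩ | ⟨t, ⟨ht, hs⟩, hin⟩)
    · exact ⟨w, hwt, Or.inl (Or.inr hw)⟩
    · exact ⟨t, ht, Or.inr ⟨hs, hin⟩⟩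

-- ===== VERDICT (by name: the statement is the Claim_ definition above) =====
theorem is_index_or_market_py_spec : Claim_equal_is_index_or_market_py := by
  intro name _
  unfold Spec_is_index_or_market_py is_index_or_market_py is_index_or_market_py_alt
  by_cases h : (name == "") = true
  · rw [if_pos h, if_pos h]
  · rw [if_neg h, if_neg h]
    exact pv_core _
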